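-- pv_equiv track=rewrite | github.com/XiaohanChai/Crown-Generation | tools/merge_2_obj_to_1_shift.py | count_obj_elements
-- ===== SOURCE A (Python) =====
-- def count_obj_elements(lines):
--     n_v = n_vt = n_vn = 0
--     for ln in lines:
--         if ln.startswith('v '):
--             n_v += 1
--         elif ln.startswith('vt '):
--             n_vt += 1
--         elif ln.startswith('vn '):
--             n_vn += 1
--     return n_v, n_vt, n_vn
-- ===== SOURCE B (Python) =====
-- def count_obj_elements(lines):
--     return (sum(1 for ln in lines if ln.startswith('v ')),
--             sum(1 for ln in lines if ln.startswith('vt ')),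
--             sum(1 for ln in lines if ln.startswith('vn ')))
-- ===== Notes on version B (the rewrite author's own statement) =====
-- stated objective: idiomatic
-- what changed: Replaces the single elif-chain pass carrying three counters with three independent generator-sum filtering scans, one per prefix (valid because the prefixes are mutually exclusive).
import Mathlib
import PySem

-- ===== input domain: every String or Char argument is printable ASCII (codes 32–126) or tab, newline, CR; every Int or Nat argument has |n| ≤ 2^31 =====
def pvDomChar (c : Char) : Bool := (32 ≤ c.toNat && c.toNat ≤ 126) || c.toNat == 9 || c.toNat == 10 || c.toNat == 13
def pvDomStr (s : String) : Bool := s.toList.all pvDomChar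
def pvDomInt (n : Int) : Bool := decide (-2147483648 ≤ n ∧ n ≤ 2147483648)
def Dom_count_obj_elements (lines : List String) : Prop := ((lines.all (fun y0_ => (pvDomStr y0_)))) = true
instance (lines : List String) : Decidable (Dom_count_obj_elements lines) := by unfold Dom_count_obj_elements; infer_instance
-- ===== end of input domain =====

-- B replaces A's single elif-chain pass over `lines` with three independent filtering
-- sum-scans, one per prefix (idiomatic; same cost).

-- ===== PORT A =====
-- one pass, three counters, elif chain
def count_obj_elements (lines : List String) : Int × Int × Int :=
  let s := lines.foldl (fun (s : Int × Int × Int) ln =>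
    if PySem.Str.startswith ln "v " then (s.1 + 1, s.2.1, s.2.2)
    else if PySem.Str.startswith ln "vt " then (s.1, s.2.1 + 1, s.2.2)
    else if PySem.Str.startswith ln "vn " then (s.1, s.2.1, s.2.2 + 1)
    else s) (0, 0, 0)
  (s.1, s.2.1, s.2.2)

-- ===== PORT B =====
-- sum(1 for ln in lines if ln.startswith(p))
def pvSumIf (lines : List String) (p : String) : Int :=
  lines.foldl (fun (acc : Int) ln => if PySem.Str.startswith ln p then acc + 1 else acc) 0

def count_obj_elements_alt (lines : List String) : Int × Int × Int :=
  (pvSumIf lines "v ", pvSumIf lines "vt ", pvSumIf lines "vn ")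

-- ===== PRECONDITION & SPEC =====
def Spec_count_obj_elements (lines : List String) (out : Int × Int × Int) : Prop := out = count_obj_elements_alt lines
instance (lines : List String) (out : Int × Int × Int) : Decidable (Spec_count_obj_elements lines out) := by unfold Spec_count_obj_elements; infer_instance

-- ===== CLAIM (what is proved, stated in full; the proofs are below) =====
def Claim_equal_count_obj_elements : Prop := ∀ (lines : List String), Dom_count_obj_elements lines → Spec_count_obj_elements lines (count_obj_elements lines)

-- ===== LEMMAS AND PROOFS =====

-- the three prefixes are mutually exclusive
theorem pv_excl (ln : String) (p q : String)
    (hpq : ¬ (p.toList <+: q.toList)) (hqp : ¬ (q.toList <+: p.toList))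
    (h : PySem.Str.startswith ln q = true) :
    PySem.Str.startswith ln p = false := by
  rw [Bool.eq_false_iff]
  intro h2
  rw [PySem.Str.startswith_eq, PySem.Chars.startswith_iff] at h h2
  rcases List.prefix_or_prefix_of_prefix h2 h with hp | hp
  · exact hpq hp
  · exact hqp hp

theorem vt_not_v (ln : String) (h : PySem.Str.startswith ln "vt " = true) :
    PySem.Str.startswith ln "v " = false :=
  pv_excl ln "v " "vt " (by decide) (by decide) h

theorem vn_not_v (ln : String) (h : PySem.Str.startswith ln "vn " = true) :
    PySem.Str.startswith ln "v " = false :=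
  pv_excl ln "v " "vn " (by decide) (by decide) h

theorem vn_not_vt (ln : String) (h : PySem.Str.startswith ln "vn " = true) :
    PySem.Str.startswith ln "vt " = false :=
  pv_excl ln "vt " "vn " (by decide) (by decide) h

theorem foldl_count_shift (lines : List String) (p : String) (a : Int) :
    lines.foldl (fun (acc : Int) ln => if PySem.Str.startswith ln p then acc + 1 else acc) a
      = a + lines.foldl (fun (acc : Int) ln => if PySem.Str.startswith ln p then acc + 1 else acc) 0 := by
  induction lines generalizing a with
  | nil => simp
  | cons ln rest ih =>
      simp only [List.foldl_cons]
      conv_lhs => rw [ih]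
      conv_rhs => rw [ih]
      split_ifs <;> ring

theorem pvSumIf_cons (ln : String) (rest : List String) (p : String) :
    pvSumIf (ln :: rest) p
      = (if PySem.Str.startswith ln p then (1 : Int) else 0) + pvSumIf rest p := by
  simp only [pvSumIf, List.foldl_cons]
  rw [foldl_count_shift]
  split_ifs <;> ring

theorem fold_eq_sums (lines : List String) (a b c : Int) :
    lines.foldl (fun (s : Int × Int × Int) ln =>
      if PySem.Str.startswith ln "v " then (s.1 + 1, s.2.1, s.2.2)
      else if PySem.Str.startswith ln "vt " then (s.1, s.2.1 + 1, s.2.2)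
      else if PySem.Str.startswith ln "vn " then (s.1, s.2.1, s.2.2 + 1)
      else s) (a, b, c)
    = (a + pvSumIf lines "v ", b + pvSumIf lines "vt ", c + pvSumIf lines "vn ") := by
  induction lines generalizing a b c with
  | nil => simp [pvSumIf]
  | cons ln rest ih =>
      simp only [List.foldl_cons]
      rw [pvSumIf_cons, pvSumIf_cons, pvSumIf_cons]
      by_cases h1 : PySem.Str.startswith ln "v "
      · have h2 : PySem.Str.startswith ln "vt " = false := by
          by_contra hc
          rw [Bool.not_eq_false] at hc
          rw [vt_not_v ln hc] at h1
          exact Bool.false_ne_true h1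
        have h3 : PySem.Str.startswith ln "vn " = false := by
          by_contra hc
          rw [Bool.not_eq_false] at hc
          rw [vn_not_v ln hc] at h1
          exact Bool.false_ne_true h1
        simp only [h1, h2, h3, if_true, Bool.false_eq_true, if_false, ih, Prod.mk.injEq]
        exact ⟨by ring, by ring, by ring⟩
      · rw [Bool.not_eq_true] at h1
        by_cases h2 : PySem.Str.startswith ln "vt "
        · have h3 : PySem.Str.startswith ln "vn " = false := by
            by_contra hc
            rw [Bool.not_eq_false] at hc
            rw [vn_not_vt ln hc] at h2
            exact Bool.false_ne_true h2
          simp only [h1, h2, h3, if_true, Bool.false_eq_true, if_false, ih, Prod.mk.injEq]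
          exact ⟨by ring, by ring, by ring⟩
        · rw [Bool.not_eq_true] at h2
          by_cases h3 : PySem.Str.startswith ln "vn "
          · simp only [h1, h2, h3, if_true, Bool.false_eq_true, if_false, ih, Prod.mk.injEq]
            exact ⟨by ring, by ring, by ring⟩
          · rw [Bool.not_eq_true] at h3
            simp only [h1, h2, h3, Bool.false_eq_true, if_false, ih, Prod.mk.injEq]
            exact ⟨by ring, by ring, by ring⟩

-- ===== VERDICT (by name: the statement is the Claim_ definition above) =====
theorem count_obj_elements_spec : Claim_equal_count_obj_elements := by
  intro lines _
  unfold Spec_count_obj_elements count_obj_elements count_obj_elements_alt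
  rw [fold_eq_sums]
  simp
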